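-- pv_equiv track=rewrite | github.com/52ivepub/CodeWars | algos_114/main.py | average_string
-- ===== SOURCE A (Python) =====
-- def average_string(s):
--     nums = ["zero", "one", "two", "three", "four", "five", "six", "seven", "eight", "nine"]
--     if not all(list(True if i in nums else False for i in s.split())) or len(s) == 0:
--         return "n/a"
--     nums = dict(enumerate(nums))
--     new_nums = {y:x for x, y in nums.items()}
--     result = [new_nums[i] for i in s.split()]
--     result = (sum(result))//len(result)
--     return nums[result]
--
--
--
--     for num in s.split():
--         pass
-- ===== SOURCE B (Python) =====
-- def average_string(s):
--     words = ["zero", "one", "two", "three", "four", "five", "six", "seven", "eight", "nine"]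
--     if len(s) == 0:
--         return "n/a"
--     tokens = s.split()
--     counts = {}
--     for t in tokens:
--         counts[t] = counts.get(t, 0) + 1
--     total = 0
--     seen = 0
--     for i, w in enumerate(words):
--         c = counts.get(w, 0)
--         total += i * c
--         seen += c
--     if seen != len(tokens):
--         return "n/a"
--     return words[total // len(tokens)]
-- ===== Notes on version B (the rewrite author's own statement) =====
-- stated objective: alternative
-- what changed: B builds a histogram (counts dict) of the tokens in one pass, then loops over the ten fixed digit words accumulating index*multiplicity and total multiplicity; validity is decided by comparing the total multiplicity with the token count, replacing A's per-token membership check, reversed-dict index lookup and sum/len passes.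
import Mathlib
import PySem

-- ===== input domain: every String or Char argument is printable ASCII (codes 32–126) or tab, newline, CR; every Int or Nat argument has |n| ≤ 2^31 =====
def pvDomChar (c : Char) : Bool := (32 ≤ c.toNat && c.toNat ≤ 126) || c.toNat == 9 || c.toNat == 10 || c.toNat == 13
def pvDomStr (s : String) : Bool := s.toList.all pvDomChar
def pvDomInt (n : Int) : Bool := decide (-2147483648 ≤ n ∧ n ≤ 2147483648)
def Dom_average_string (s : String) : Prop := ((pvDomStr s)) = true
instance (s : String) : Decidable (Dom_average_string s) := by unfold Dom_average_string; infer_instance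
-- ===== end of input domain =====

-- B replaces A's validate pass, enumerate dict, reversed-dict lookup and sum/len passes by a
-- token histogram plus a constant pass over the ten digit words (objective: alternative).

-- ===== PORT A =====
def pvNums : List String :=
  ["zero", "one", "two", "three", "four", "five", "six", "seven", "eight", "nine"]

def average_string (s : String) : String :=
  let nums := pvNums
  if (!((PySem.Str.split₀ s).all (fun i => nums.contains i))) || (PySem.Str.len s == 0) then
    "n/a"
  else
    let numsD : PySem.Dict Int String := PySem.Dict.ofList (PySem.List.enumerate nums)
    let newNums : PySem.Dict String Int :=
      PySem.Dict.ofList (numsD.items.map (fun p => (p.2, p.1)))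
    -- every token is a key of newNums in this branch, so the KeyError default is never used
    let result : List Int := (PySem.Str.split₀ s).map (fun i => (newNums.get? i).getD 0)
    -- result.length = 0 (Python ZeroDivisionError) is excluded by Pre_
    let r := PySem.Int.floordiv result.sum (result.length : Int)
    (numsD.get? r).getD ""   -- r is always a key in this branch; default never used

-- ===== PORT B =====
def average_string_alt (s : String) : String :=
  let words := pvNums
  if PySem.Str.len s == 0 then "n/a"
  else
    let tokens := PySem.Str.split₀ s
    -- counts[t] = counts.get(t, 0) + 1, built over all tokens
    let counts : PySem.Dict String Int :=
      tokens.foldl (fun d t => d.insert t (d.getD t 0 + 1)) PySem.Dict.empty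
    -- for i, w in enumerate(words): total += i*c; seen += c
    let p : Int × Int := (PySem.List.enumerate words).foldl
      (fun (p : Int × Int) iw => (p.1 + iw.1 * counts.getD iw.2 0, p.2 + counts.getD iw.2 0))
      ((0 : Int), (0 : Int))
    -- tokens.length = 0 (Python ZeroDivisionError) is excluded by Pre_
    if p.2 != (tokens.length : Int) then "n/a"
    else (PySem.List.pyGet? words (PySem.Int.floordiv p.1 (tokens.length : Int))).getD ""

-- ===== PRECONDITION & SPEC =====
-- Pre_ excludes nonempty whitespace-only strings, on which both A and B raise ZeroDivisionError.
def Pre_average_string (s : String) : Prop :=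
  PySem.Str.len s = 0 ∨ PySem.Str.split₀ s ≠ []
instance (s : String) : Decidable (Pre_average_string s) := by
  unfold Pre_average_string; infer_instance

def pvWitness_average_string : String := "one two"

def Spec_average_string (s : String) (out : String) : Prop := out = average_string_alt s
instance (s : String) (out : String) : Decidable (Spec_average_string s out) := by
  unfold Spec_average_string; infer_instance

-- ===== CLAIM (what is proved, stated in full; the proofs are below) =====
def Claim_equal_average_string : Prop :=
  ∀ (s : String), Dom_average_string s → Pre_average_string s →
    Spec_average_string s (average_string s)

-- ===== LEMMAS AND PROOFS =====

-- the index A looks up for a valid token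
def pvIdx (t : String) : Int := (((PySem.List.index? pvNums t).getD 0 : Nat) : Int)

lemma pvIdx_bounds (t : String) : 0 ≤ pvIdx t ∧ pvIdx t ≤ 9 := by
  constructor
  · exact Int.natCast_nonneg _
  · unfold pvIdx
    rcases h : PySem.List.index? pvNums t with _ | k
    · simp
    · have hk : k < pvNums.length := by
        rcases PySem.List.getElem_of_index?_eq_some h with ⟨hk, _⟩
        exact hk
      simp only [Option.getD_some]
      have : pvNums.length = 10 := by decide
      omega

lemma pvSum_bounds (l : List String) :
    0 ≤ (l.map pvIdx).sum ∧ (l.map pvIdx).sum ≤ 9 * l.length := by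
  induction l with
  | nil => simp
  | cons t rest ih =>
    have h := pvIdx_bounds t
    simp only [List.map_cons, List.sum_cons, List.length_cons]
    constructor
    · omega
    · push_cast; omega

-- A's reversed dict looks up exactly the list index, on valid tokens
lemma pvNewNums_get (t : String) (h : pvNums.contains t = true) :
    ((PySem.Dict.ofList (((PySem.Dict.ofList (PySem.List.enumerate pvNums) :
        PySem.Dict Int String)).items.map (fun p => (p.2, p.1))) :
        PySem.Dict String Int).get? t).getD 0 = pvIdx t := by
  have hm : t ∈ pvNums := by simpa using h
  simp only [pvNums, List.mem_cons, List.not_mem_nil, or_false] at hm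
  rcases hm with rfl | rfl | rfl | rfl | rfl | rfl | rfl | rfl | rfl | rfl <;> decide

-- A's nums dict agrees with list indexing for every r in 0..9
lemma pvNumsD_get (r : Int) (h0 : 0 ≤ r) (h9 : r ≤ 9) :
    ((PySem.Dict.ofList (PySem.List.enumerate pvNums) : PySem.Dict Int String).get? r).getD ""
      = (PySem.List.pyGet? pvNums r).getD "" := by
  interval_cases r <;> decide

-- B's two accumulated sums over the ten words, expressed by token counts:
-- total is the index-sum of the valid tokens, seen is how many tokens are valid
lemma pvHist_sums (l : List String) :
    (0 + 0 * (l.count "zero" : Int) + 1 * (l.count "one" : Int) + 2 * (l.count "two" : Int)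
       + 3 * (l.count "three" : Int) + 4 * (l.count "four" : Int) + 5 * (l.count "five" : Int)
       + 6 * (l.count "six" : Int) + 7 * (l.count "seven" : Int) + 8 * (l.count "eight" : Int)
       + 9 * (l.count "nine" : Int)
      = ((l.filter (fun t => pvNums.contains t)).map pvIdx).sum)
    ∧ (0 + (l.count "zero" : Int) + (l.count "one" : Int) + (l.count "two" : Int)
       + (l.count "three" : Int) + (l.count "four" : Int) + (l.count "five" : Int)
       + (l.count "six" : Int) + (l.count "seven" : Int) + (l.count "eight" : Int)
       + (l.count "nine" : Int)
      = (l.countP (fun t => pvNums.contains t) : Int)) := by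
  induction l with
  | nil => simp
  | cons t rest ih =>
    obtain ⟨ih1, ih2⟩ := ih
    by_cases ht : pvNums.contains t = true
    · have hm : t ∈ pvNums := by simpa using ht
      simp only [pvNums, List.mem_cons, List.not_mem_nil, or_false] at hm
      have i0 : pvIdx "zero" = 0 := by decide
      have i1 : pvIdx "one" = 1 := by decide
      have i2 : pvIdx "two" = 2 := by decide
      have i3 : pvIdx "three" = 3 := by decide
      have i4 : pvIdx "four" = 4 := by decide
      have i5 : pvIdx "five" = 5 := by decide
      have i6 : pvIdx "six" = 6 := by decide
      have i7 : pvIdx "seven" = 7 := by decide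
      have i8 : pvIdx "eight" = 8 := by decide
      have i9 : pvIdx "nine" = 9 := by decide
      rcases hm with rfl | rfl | rfl | rfl | rfl | rfl | rfl | rfl | rfl | rfl <;>
        · refine ⟨?_, ?_⟩ <;>
            · simp [pvNums,
                i0, i1, i2, i3, i4, i5, i6, i7, i8, i9] at ih1 ih2 ⊢
              omega
    · have hne : ∀ w ∈ pvNums, (t == w) = false := by
        intro w hw
        rcases hq : t == w with _ | _
        · rfl
        · exfalso; apply ht
          simp only [beq_iff_eq] at hq
          subst hq
          simpa using hw
      have h0 := hne "zero" (by decide)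
      have h1 := hne "one" (by decide)
      have h2 := hne "two" (by decide)
      have h3 := hne "three" (by decide)
      have h4 := hne "four" (by decide)
      have h5 := hne "five" (by decide)
      have h6 := hne "six" (by decide)
      have h7 := hne "seven" (by decide)
      have h8 := hne "eight" (by decide)
      have h9 := hne "nine" (by decide)
      constructor <;>
        simp only [List.count_cons, List.countP_cons, List.filter_cons, ht, if_false,
          h0, h1, h2, h3, h4, h5, h6, h7, h8, h9, Bool.false_eq_true,
          Nat.add_zero, ih1, ih2]

-- B's 10-step fold over enumerate(words), evaluated (definitional)
lemma pvFold_eval (d : PySem.Dict String Int) :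
    (PySem.List.enumerate pvNums).foldl
      (fun (p : Int × Int) iw => (p.1 + iw.1 * d.getD iw.2 0, p.2 + d.getD iw.2 0))
      ((0 : Int), (0 : Int))
    = (0 + 0 * d.getD "zero" 0 + 1 * d.getD "one" 0 + 2 * d.getD "two" 0 + 3 * d.getD "three" 0
         + 4 * d.getD "four" 0 + 5 * d.getD "five" 0 + 6 * d.getD "six" 0 + 7 * d.getD "seven" 0
         + 8 * d.getD "eight" 0 + 9 * d.getD "nine" 0,
       0 + d.getD "zero" 0 + d.getD "one" 0 + d.getD "two" 0 + d.getD "three" 0 + d.getD "four" 0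
         + d.getD "five" 0 + d.getD "six" 0 + d.getD "seven" 0 + d.getD "eight" 0
         + d.getD "nine" 0) := rfl

-- ===== VERDICT (by name: the statement is the Claim_ definition above) =====
theorem average_string_spec : Claim_equal_average_string := by
  intro s _ hpre
  unfold Spec_average_string average_string average_string_alt
  by_cases hlen : PySem.Str.len s = 0
  · have hc : (PySem.Str.len s == 0) = true := by
      simp only [beq_iff_eq]; exact hlen
    have hcond : ((!((PySem.Str.split₀ s).all fun i => pvNums.contains i))
        || (PySem.Str.len s == 0)) = true := by rw [hc]; simp
    rw [if_pos hcond, if_pos hc]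
  · have hlen' : (PySem.Str.len s == 0) = false := by
      simp only [beq_eq_false_iff_ne, ne_eq]; exact hlen
    have htoks : PySem.Str.split₀ s ≠ [] := by
      rcases hpre with h | h
      · exact absurd h hlen
      · exact h
    -- the counts dict is Counter(tokens)
    have hcnt : ∀ w : String,
        (((PySem.Str.split₀ s).foldl (fun d t => d.insert t (d.getD t 0 + 1)) PySem.Dict.empty :
          PySem.Dict String Int).getD w 0) = ((PySem.Str.split₀ s).count w : Int) := by
      intro w
      rw [PySem.Dict.foldl_insert_getD_add_one_eq_counter, PySem.Dict.getD_counter]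
    have hsums := pvHist_sums (PySem.Str.split₀ s)
    by_cases hall : ((PySem.Str.split₀ s).all fun i => pvNums.contains i) = true
    · -- all tokens valid: both sides are the floor-average lookup
      have hcond : ((!((PySem.Str.split₀ s).all fun i => pvNums.contains i))
          || (PySem.Str.len s == 0)) = false := by rw [hall, hlen']; rfl
      rw [if_neg (by rw [hcond]; exact Bool.false_ne_true),
          if_neg (by rw [hlen']; exact Bool.false_ne_true)]
      dsimp only; rw [pvFold_eval]; simp only [hcnt]
      have hmem : ∀ t ∈ PySem.Str.split₀ s, pvNums.contains t = true :=
        fun t htm => (List.all_eq_true.mp hall) t htm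
      have hfilter : (PySem.Str.split₀ s).filter (fun t => pvNums.contains t)
          = PySem.Str.split₀ s := List.filter_eq_self.mpr hmem
      have hcountP : (PySem.Str.split₀ s).countP (fun t => pvNums.contains t)
          = (PySem.Str.split₀ s).length := List.countP_eq_length.mpr hmem
      rw [hfilter, hcountP] at hsums
      rw [hsums.1, hsums.2, if_neg (by simp)]
      -- A's side: reversed-dict lookups are the indices
      have hmap : (PySem.Str.split₀ s).map
          (fun i => ((PySem.Dict.ofList (((PySem.Dict.ofList (PySem.List.enumerate pvNums) :
            PySem.Dict Int String)).items.map (fun p => (p.2, p.1))) :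
            PySem.Dict String Int).get? i).getD 0) = (PySem.Str.split₀ s).map pvIdx :=
        List.map_congr_left (fun t htm => pvNewNums_get t (hmem t htm))
      rw [hmap]
      simp only [List.length_map]
      have hlenpos : 0 < ((PySem.Str.split₀ s).length : Int) := by
        rcases hx : PySem.Str.split₀ s with _ | ⟨a, l⟩
        · exact absurd hx htoks
        · simp
      have hsb := pvSum_bounds (PySem.Str.split₀ s)
      set S := ((PySem.Str.split₀ s).map pvIdx).sum with hS
      set L := ((PySem.Str.split₀ s).length : Int) with hL
      have h0 : 0 ≤ PySem.Int.floordiv S L := by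
        rw [PySem.Int.floordiv_eq_ediv_of_pos hlenpos]
        exact Int.ediv_nonneg hsb.1 (le_of_lt hlenpos)
      have h9 : PySem.Int.floordiv S L ≤ 9 := by
        have hlt : PySem.Int.floordiv S L < 10 := by
          rw [PySem.Int.floordiv_lt_iff_lt_mul hlenpos]
          have h92 : S ≤ 9 * L := by
            have := hsb.2; push_cast at this ⊢; omega
          omega
        omega
      exact pvNumsD_get _ h0 h9
    · -- an invalid token: A returns "n/a"; B's seen is strictly below the token count
      have hall' : ((PySem.Str.split₀ s).all fun i => pvNums.contains i) = false :=
        Bool.eq_false_iff.mpr hall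
      have hcond : ((!((PySem.Str.split₀ s).all fun i => pvNums.contains i))
          || (PySem.Str.len s == 0)) = true := by rw [hall']; rfl
      rw [if_pos hcond, if_neg (by rw [hlen']; exact Bool.false_ne_true)]
      dsimp only; rw [pvFold_eval]; simp only [hcnt]
      rw [hsums.2]
      have hlt : (PySem.Str.split₀ s).countP (fun t => pvNums.contains t)
          < (PySem.Str.split₀ s).length := by
        rcases Nat.lt_or_ge ((PySem.Str.split₀ s).countP (fun t => pvNums.contains t))
            (PySem.Str.split₀ s).length with h | h
        · exact h
        · exfalso
          have hle := List.countP_le_length (l := PySem.Str.split₀ s)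
            (p := fun t => pvNums.contains t)
          have heq : (PySem.Str.split₀ s).countP (fun t => pvNums.contains t)
              = (PySem.Str.split₀ s).length := le_antisymm hle h
          have := List.countP_eq_length.mp heq
          exact absurd (List.all_eq_true.mpr this) (by rw [hall']; exact Bool.false_ne_true)
      rw [if_pos (by rw [bne_iff_ne]; intro hq; omega)]
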